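-- pv_equiv track=rewrite | github.com/AncientTeen/zozo | trend_functions.py | rise_n_fall_criterion
-- ===== SOURCE A (Python) =====
-- def rise_n_fall_criterion(x_t: list) -> tuple[int, int]:
--     """
--      "rising" and "falling" series criterion function
--      """
--     n = len(x_t)
--     y = [1 if (x_t[i + 1] - x_t[i]) >= 0 else -1 for i in range(n - 1)]
--
--     series_count = 1
--     max_series_length = 1
--     current_series_length = 1
--
--     for i in range(1, n - 1):
--         if y[i] == y[i - 1]:
--             current_series_length += 1
--         else:
--             series_count += 1
--             max_series_length = max(max_series_length, current_series_length)
--             current_series_length = 1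
--
--     max_series_length = max(max_series_length, current_series_length)
--
--     v = series_count
--     d = max_series_length
--
--     return v, d
-- ===== SOURCE B (Python) =====
-- def rise_n_fall_criterion(x_t: list) -> tuple[int, int]:
--     n = len(x_t)
--     if n < 2:
--         return (1, 1)
--     m = n - 1
--     # positions where the monotonicity direction flips, framed by the two ends
--     cuts = [0] + [i for i in range(1, m)
--                   if (x_t[i + 1] >= x_t[i]) != (x_t[i] >= x_t[i - 1])] + [m]
--     return (len(cuts) - 1, max(b - a for a, b in zip(cuts, cuts[1:])))
-- ===== Notes on version B (the rewrite author's own statement) =====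
-- stated objective: alternative
-- what changed: B never builds the sign sequence or run counters: it collects the boundary positions where the monotonicity direction flips (a filtered range over x itself), frames them with 0 and n-1, and reads the series count as the number of boundary gaps and the max series length as the largest gap between consecutive boundaries.
import Mathlib
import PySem

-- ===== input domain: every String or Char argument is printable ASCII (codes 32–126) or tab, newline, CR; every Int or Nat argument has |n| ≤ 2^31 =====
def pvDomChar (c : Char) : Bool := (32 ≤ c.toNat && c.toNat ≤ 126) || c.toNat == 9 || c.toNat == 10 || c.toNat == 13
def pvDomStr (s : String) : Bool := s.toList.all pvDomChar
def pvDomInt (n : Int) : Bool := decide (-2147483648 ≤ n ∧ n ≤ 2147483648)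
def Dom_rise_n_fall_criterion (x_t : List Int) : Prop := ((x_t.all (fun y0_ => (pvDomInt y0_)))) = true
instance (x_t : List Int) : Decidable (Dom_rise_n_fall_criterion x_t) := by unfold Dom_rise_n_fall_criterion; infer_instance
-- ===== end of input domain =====

-- B replaces A's sign list + count/max/current-length counters by collecting the
-- boundary positions where the monotonicity direction flips and reading the answers
-- off the gaps between consecutive boundaries: alternative decomposition, same O(n).


-- ===== PORT A =====
-- Literal port of A. All list indices A uses are provably in range, so pyGetD's
-- default 0 is never consulted.
def rise_n_fall_criterion (x_t : List Int) : Int × Int :=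
  let n : Int := x_t.length
  let y : List Int := (PySem.List.pyRange 0 (n - 1) 1).map (fun i =>
    if PySem.List.pyGetD x_t (i + 1) 0 - PySem.List.pyGetD x_t i 0 ≥ 0 then (1 : Int) else -1)
  let st : Int × Int × Int := (PySem.List.pyRange 1 (n - 1) 1).foldl (fun st i =>
    if PySem.List.pyGetD y i 0 == PySem.List.pyGetD y (i - 1) 0 then
      (st.1, st.2.1, st.2.2 + 1)
    else
      (st.1 + 1, max st.2.1 st.2.2, 1)) (1, 1, 1)
  (st.1, max st.2.1 st.2.2)

-- ===== PORT B =====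
-- Port of Source B: boundary positions where the direction flips, framed by 0 and n-1;
-- answers read off the gaps. Indices Source B uses are in range, so pyGetD's default 0 is
-- never consulted; the `[]` match arm is Python's max on an empty sequence, which is
-- unreachable because cuts always has at least two elements.
def rise_n_fall_criterion_alt (x_t : List Int) : Int × Int :=
  let n : Int := x_t.length
  if n < 2 then (1, 1)
  else
    let m : Int := n - 1
    let cuts : List Int := 0 :: ((PySem.List.pyRange 1 m 1).filter (fun i =>
      (decide (PySem.List.pyGetD x_t (i + 1) 0 ≥ PySem.List.pyGetD x_t i 0)) !=
      (decide (PySem.List.pyGetD x_t i 0 ≥ PySem.List.pyGetD x_t (i - 1) 0)))) ++ [m]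
    let gaps : List Int := (cuts.zip (cuts.drop 1)).map (fun p => p.2 - p.1)
    ((cuts.length : Int) - 1, match gaps with | [] => 1 | g :: gs => gs.foldl max g)

-- ===== PRECONDITION & SPEC =====
def Spec_rise_n_fall_criterion (x_t : List Int) (out : Int × Int) : Prop := out = rise_n_fall_criterion_alt x_t
instance (x_t : List Int) (out : Int × Int) : Decidable (Spec_rise_n_fall_criterion x_t out) := by unfold Spec_rise_n_fall_criterion; infer_instance

-- ===== CLAIM (what is proved, stated in full; the proofs are below) =====
def Claim_equal_rise_n_fall_criterion : Prop := ∀ (x_t : List Int), Dom_rise_n_fall_criterion x_t → Spec_rise_n_fall_criterion x_t (rise_n_fall_criterion x_t)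

-- ===== LEMMAS AND PROOFS =====

-- A's sign sequence, in structural form (proof helper only).
def signsOf (x_t : List Int) : List Int :=
  (x_t.zip (x_t.drop 1)).map (fun p => if p.2 - p.1 ≥ 0 then (1 : Int) else -1)

-- Run lengths of a sign sequence (proof helper: the common value both programs compute).
def pvRunsB (signs : List Int) : List Int :=
  match signs with
  | [] => []
  | s :: rest =>
    ((1 : Int) + (rest.takeWhile (fun t => t == s)).length)
      :: pvRunsB (rest.dropWhile (fun t => t == s))
termination_by signs.length
decreasing_by
  simp only [List.length_cons]
  exact Nat.lt_succ_of_le (List.length_dropWhile_le _ _)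

-- Structural version of A's loop state machine (proof helper only).
def loopA (prev : Int) (st : Int × Int × Int) : List Int → Int × Int × Int
  | [] => st
  | s :: rest =>
    if s == prev then loopA s (st.1, st.2.1, st.2.2 + 1) rest
    else loopA s (st.1 + 1, max st.2.1 st.2.2, 1) rest

-- max of the run lengths, the first run continued by a partial count `cur`.
def runMax (cur : Int) : List Int → Int
  | [] => cur
  | r :: rs => rs.foldl max (cur + r - 1)

lemma foldl_max_init (a : Int) : ∀ (l : List Int) (b : Int),
    l.foldl max (max a b) = max a (l.foldl max b) := by
  intro l
  induction l with
  | nil => intro b; rfl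
  | cons c l ih =>
    intro b
    simp only [List.foldl_cons, max_assoc, ih]

lemma pvRunsB_ne_nil (s : Int) (ys : List Int) : pvRunsB (s :: ys) ≠ [] := by
  rw [pvRunsB]; simp

lemma pvRunsB_head_pos (s : Int) (ys : List Int) (r : Int) (rs : List Int)
    (h : pvRunsB (s :: ys) = r :: rs) : 1 ≤ r := by
  rw [pvRunsB] at h
  injection h with h1 _
  omega

-- Core invariant: A's structural loop computes the run statistics.
lemma loopA_runs : ∀ (ys : List Int) (s c mx cur : Int),
    (let st := loopA s (c, mx, cur) ys; (st.1, max st.2.1 st.2.2)) =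
      (c + (pvRunsB (s :: ys)).length - 1, max mx (runMax cur (pvRunsB (s :: ys)))) := by
  intro ys
  induction ys with
  | nil =>
    intro s c mx cur
    simp [loopA, pvRunsB, runMax]
  | cons s' ys' ih =>
    intro s c mx cur
    by_cases h : s' = s
    · subst h
      have hA : loopA s' (c, mx, cur) (s' :: ys') = loopA s' (c, mx, cur + 1) ys' := by
        simp [loopA]
      have hR : pvRunsB (s' :: s' :: ys') =
          ((1 : Int) + (1 + ((ys'.takeWhile (fun t => t == s')).length : Int)))
            :: pvRunsB (ys'.dropWhile (fun t => t == s')) := by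
        rw [pvRunsB]; simp; ring_nf
      have hR' : pvRunsB (s' :: ys') =
          ((1 : Int) + ((ys'.takeWhile (fun t => t == s')).length : Int))
            :: pvRunsB (ys'.dropWhile (fun t => t == s')) := by
        rw [pvRunsB]
      rw [hA, ih s' c mx (cur + 1), hR, hR']
      simp only [runMax, List.length_cons, Prod.mk.injEq]
      ring_nf
      exact ⟨trivial, trivial⟩
    · have hb : (s' == s) = false := by simp [h]
      have hA : loopA s (c, mx, cur) (s' :: ys') = loopA s' (c + 1, max mx cur, 1) ys' := by
        simp [loopA, hb]
      have hR : pvRunsB (s :: s' :: ys') = 1 :: pvRunsB (s' :: ys') := by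
        rw [pvRunsB]; simp [hb]
      rw [hA, ih s' (c + 1) (max mx cur) 1, hR]
      obtain ⟨r, rs, hrs⟩ : ∃ r rs, pvRunsB (s' :: ys') = r :: rs := by
        cases hq : pvRunsB (s' :: ys') with
        | nil => exact absurd hq (pvRunsB_ne_nil _ _)
        | cons r rs => exact ⟨r, rs, rfl⟩
      rw [hrs]
      simp only [runMax, List.length_cons, Prod.mk.injEq, List.foldl_cons]
      refine ⟨by push_cast; ring, ?_⟩
      rw [show (1 : Int) + r - 1 = r by ring, show cur + 1 - 1 = cur by ring]
      rw [foldl_max_init, max_assoc]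

-- A's y equals signsOf.
lemma y_eq_signs (x_t : List Int) :
    (PySem.List.pyRange 0 ((x_t.length : Int) - 1) 1).map (fun i =>
      if PySem.List.pyGetD x_t (i + 1) 0 - PySem.List.pyGetD x_t i 0 ≥ 0 then (1 : Int) else -1) =
    signsOf x_t := by
  apply List.ext_getElem
  · simp [signsOf, PySem.List.length_pyRange_one]
  · intro k h1 h2
    have hk : k < x_t.length - 1 := by
      simpa [PySem.List.length_pyRange_one, Int.toNat_lt'] using h1
    simp only [signsOf, List.getElem_map, PySem.List.getElem_pyRange_one, List.getElem_zip,
      List.getElem_drop]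
    have e1 : PySem.List.pyGetD x_t ((0 : Int) + (k : Int) + 1) 0 = x_t[k + 1]'(by omega) := by
      rw [show (0 : Int) + (k : Int) + 1 = ((k + 1 : Nat) : Int) by push_cast; ring]
      rw [PySem.List.pyGetD_natCast]
      exact List.getD_eq_getElem _ _ _
    have e2 : PySem.List.pyGetD x_t ((0 : Int) + (k : Int)) 0 = x_t[k]'(by omega) := by
      rw [show (0 : Int) + (k : Int) = ((k : Nat) : Int) by ring]
      rw [PySem.List.pyGetD_natCast]
      exact List.getD_eq_getElem _ _ _
    rw [e1, e2]
    simp [show 1 + k = k + 1 by omega]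

-- A's index fold equals the structural loop.
lemma fold_eq_loopA (y : List Int) (step : (Int × Int × Int) → Int → (Int × Int × Int))
    (hstep : step = fun st i =>
      if PySem.List.pyGetD y i 0 == PySem.List.pyGetD y (i - 1) 0 then
        (st.1, st.2.1, st.2.2 + 1)
      else (st.1 + 1, max st.2.1 st.2.2, 1)) :
    ∀ (k : Nat) (st : Int × Int × Int), k < y.length →
      (PySem.List.pyRange ((k : Int) + 1) (y.length : Int) 1).foldl step st =
        loopA (PySem.List.pyGetD y (k : Int) 0) st (y.drop (k + 1)) := by
  intro k st hk
  obtain ⟨m, hm⟩ : ∃ m, y.length - (k + 1) = m := ⟨_, rfl⟩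
  induction m generalizing k st with
  | zero =>
    have hlen : y.length = k + 1 := by omega
    rw [PySem.List.pyRange_one_eq_nil (by omega)]
    rw [List.drop_eq_nil_of_le (by omega)]
    rfl
  | succ m ih =>
    have hlt : ((k : Int) + 1) < (y.length : Int) := by omega
    rw [PySem.List.pyRange_one_cons hlt]
    rw [List.foldl_cons]
    have hk1 : k + 1 < y.length := by omega
    have hdrop : y.drop (k + 1) = y[k + 1]'hk1 :: y.drop (k + 2) :=
      List.drop_eq_getElem_cons hk1
    have eK1 : PySem.List.pyGetD y ((k : Int) + 1) 0 = y[k + 1]'hk1 := by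
      rw [show (k : Int) + 1 = ((k + 1 : Nat) : Int) by push_cast; ring]
      rw [PySem.List.pyGetD_natCast]
      exact List.getD_eq_getElem _ _ _
    have eK : PySem.List.pyGetD y ((k : Int) + 1 - 1) 0 = PySem.List.pyGetD y (k : Int) 0 := by
      norm_num
    rw [hstep]
    simp only [eK1, eK, hdrop, loopA]
    by_cases hc : y[k + 1]'hk1 == PySem.List.pyGetD y (k : Int) 0
    · simp only [hc, if_true]
      have := ih (k + 1) (st.1, st.2.1, st.2.2 + 1) hk1 (by omega)
      rw [hstep] at this
      rw [show (k : Int) + 1 + 1 = ((k + 1 : Nat) : Int) + 1 by push_cast; ring]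
      rw [this]
      have e' : PySem.List.pyGetD y ((k + 1 : Nat) : Int) 0 = y[k + 1]'hk1 := by
        push_cast; exact eK1
      rw [e', show k + 1 + 1 = k + 2 from rfl]
    · have hcf : (y[k + 1]'hk1 == PySem.List.pyGetD y (k : Int) 0) = false := by
        simpa using hc
      simp only [hcf, Bool.false_eq_true, if_false]
      have := ih (k + 1) (st.1 + 1, max st.2.1 st.2.2, 1) hk1 (by omega)
      rw [hstep] at this
      rw [show (k : Int) + 1 + 1 = ((k + 1 : Nat) : Int) + 1 by push_cast; ring]
      rw [this]
      have e' : PySem.List.pyGetD y ((k + 1 : Nat) : Int) 0 = y[k + 1]'hk1 := by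
        push_cast; exact eK1
      rw [e', show k + 1 + 1 = k + 2 from rfl]

-- A computes the run statistics of signsOf.
lemma A_eq_runs (x_t : List Int) (h2 : 2 ≤ x_t.length) :
    rise_n_fall_criterion x_t =
      (((pvRunsB (signsOf x_t)).length : Int), (pvRunsB (signsOf x_t)).foldl max 1) := by
  simp only [rise_n_fall_criterion]
  rw [y_eq_signs x_t]
  obtain ⟨sg, ys, hs⟩ : ∃ sg ys, signsOf x_t = sg :: ys := by
    cases hq : signsOf x_t with
    | nil =>
      exfalso
      have : (signsOf x_t).length = min x_t.length (x_t.length - 1) := by simp [signsOf]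
      rw [hq] at this
      simp at this
      omega
    | cons sg ys => exact ⟨sg, ys, rfl⟩
  rw [hs]
  have hb : ((x_t.length : Int) - 1) = ((sg :: ys).length : Int) := by
    have : (signsOf x_t).length = min x_t.length (x_t.length - 1) := by simp [signsOf]
    rw [hs] at this
    simp at this ⊢
    omega
  rw [hb]
  have h0 := fold_eq_loopA (sg :: ys) _ rfl 0 (1, 1, 1) (by simp)
  simp only [Nat.cast_zero, zero_add, PySem.List.pyGetD_zero_cons, List.drop_succ_cons,
    List.drop_zero] at h0
  rw [h0]
  have hrw := loopA_runs ys sg 1 1 1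
  simp only [] at hrw
  rw [hrw]
  obtain ⟨r, rs, hrs⟩ : ∃ r rs, pvRunsB (sg :: ys) = r :: rs := by
    cases hq : pvRunsB (sg :: ys) with
    | nil => exact absurd hq (pvRunsB_ne_nil _ _)
    | cons r rs => exact ⟨r, rs, rfl⟩
  rw [hrs]
  simp only [runMax, List.length_cons, List.foldl_cons, Prod.mk.injEq]
  constructor
  · push_cast; ring
  · rw [show (1 : Int) + r - 1 = r by ring]
    rw [show max (1 : Int) r = max 1 r from rfl, foldl_max_init]

-- ===== B side =====

-- Change positions of a sign sequence (Nat indices), and the framed cut list.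
def changesN (y : List Int) : List Nat :=
  (List.range' 1 (y.length - 1)).filter (fun i => decide (y.getD i 0 ≠ y.getD (i - 1) 0))

def cutsN (y : List Int) : List Nat := 0 :: changesN y ++ [y.length]

def gapsN (l : List Nat) : List Int :=
  (l.zip (l.drop 1)).map (fun p => (p.2 : Int) - (p.1 : Int))

lemma gapsN_cons2 (a b : Nat) (l : List Nat) :
    gapsN (a :: b :: l) = ((b : Int) - (a : Int)) :: gapsN (b :: l) := rfl

lemma gapsN_map_add (c : Nat) : ∀ (l : List Nat), gapsN (l.map (c + ·)) = gapsN l := by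
  intro l
  induction l with
  | nil => rfl
  | cons a t ih =>
    cases t with
    | nil => rfl
    | cons b t' =>
      simp only [List.map_cons] at ih ⊢
      rw [gapsN_cons2, gapsN_cons2, ih]
      congr 1
      push_cast
      ring

-- The gaps between consecutive cuts are exactly the run lengths.
lemma gaps_cuts_eq_runs : ∀ (N : Nat) (y : List Int), y.length ≤ N → y ≠ [] →
    gapsN (cutsN y) = pvRunsB y := by
  intro N
  induction N with
  | zero => intro y hy hne; cases y with
    | nil => exact absurd rfl hne
    | cons a t => simp at hy
  | succ N ih =>
    rintro (_ | ⟨s, rest⟩) hy hne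
    · exact absurd rfl hne
    set t := rest.takeWhile (fun e => e == s) with ht_def
    set rest' := rest.dropWhile (fun e => e == s) with hrest'_def
    have hsplit : t ++ rest' = rest := List.takeWhile_append_dropWhile
    set k := t.length with hk_def
    have hrlen : rest.length = k + rest'.length := by
      rw [← hsplit, List.length_append]
    have ht_mem : ∀ e ∈ t, e = s := by
      intro e he
      have := List.mem_takeWhile_imp he
      simpa using this
    -- getD facts on y = s :: rest
    have hlow : ∀ i, i ≤ k → (s :: rest).getD i 0 = s := by
      intro i hi
      cases i with
      | zero => rfl
      | succ j =>
        have hj : j < k := by omega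
        have : rest.getD j 0 = t.getD j 0 := by
          rw [← hsplit]; exact List.getD_append _ _ _ _ hj
        simp only [List.getD_cons_succ, this]
        rw [List.getD_eq_getElem _ _ hj]
        exact ht_mem _ (List.getElem_mem hj)
    have hhigh : ∀ j, j < rest'.length → (s :: rest).getD (k + 1 + j) 0 = rest'.getD j 0 := by
      intro j hj
      have e1 : (s :: rest).getD (k + 1 + j) 0 = rest.getD (k + j) 0 := by
        rw [show k + 1 + j = (k + j) + 1 by omega]
        exact List.getD_cons_succ ..
      rw [e1, ← hsplit, List.getD_append_right _ _ _ _ (by omega)]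
      congr 1
      omega
    -- predicate
    set P : Nat → Bool := fun i => decide ((s :: rest).getD i 0 ≠ (s :: rest).getD (i - 1) 0)
      with hP_def
    have hlen1 : (s :: rest).length - 1 = k + rest'.length := by simp [hrlen]
    have hchanges : changesN (s :: rest) =
        (List.range' 1 k ++ List.range' (1 + k) rest'.length).filter P := by
      rw [changesN, hlen1, ← List.range'_append_1]
    have hfilter_low : (List.range' 1 k).filter P = [] := by
      rw [List.filter_eq_nil_iff]
      intro i hi
      rw [List.mem_range'_1] at hi
      simp only [hP_def]
      rw [hlow i (by omega), hlow (i - 1) (by omega)]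
      simp
    cases hr' : rest' with
    | nil =>
      -- single run
      have hch : changesN (s :: rest) = [] := by
        rw [hchanges, hr']
        simp [hfilter_low]
      rw [cutsN, hch]
      rw [pvRunsB]
      rw [← ht_def, ← hrest'_def, hr']
      have hy1 : (s :: rest).length = k + 1 := by simp [hrlen, hr']
      rw [hy1]
      simp only [gapsN, pvRunsB]
      simp
      ring
    | cons s' r2 =>
      have hs' : (s' == s) = false := by
        have := List.head?_dropWhile_not (fun e => e == s) rest
        rw [← hrest'_def, hr'] at this
        simpa using this
      have hL : rest'.length = r2.length + 1 := by rw [hr']; simp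
      -- change positions
      have hPk1 : P (k + 1) = true := by
        simp only [hP_def]
        have e1 : (s :: rest).getD (k + 1) 0 = s' := by
          have := hhigh 0 (by omega)
          rw [hr'] at this
          simpa using this
        have e2 : (s :: rest).getD (k + 1 - 1) 0 = s := by
          rw [show k + 1 - 1 = k by omega]; exact hlow k (le_refl _)
        rw [e1, e2]
        simpa using hs'
      have hhighP : ∀ j, j < r2.length → P (k + 2 + j) =
          decide (rest'.getD (1 + j) 0 ≠ rest'.getD (1 + j - 1) 0) := by
        intro j hj
        simp only [hP_def]
        have e1 : (s :: rest).getD (k + 2 + j) 0 = rest'.getD (j + 1) 0 := by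
          have := hhigh (j + 1) (by omega)
          rw [show k + 1 + (j + 1) = k + 2 + j by omega] at this
          exact this
        have e2 : (s :: rest).getD (k + 2 + j - 1) 0 = rest'.getD j 0 := by
          have := hhigh j (by omega)
          rw [show k + 1 + j = k + 2 + j - 1 by omega] at this
          exact this
        rw [e1, e2, show (1 : Nat) + j - 1 = j by omega, show 1 + j = j + 1 by omega]
      have hch : changesN (s :: rest) = (k + 1) :: (changesN rest').map ((k + 1) + ·) := by
        rw [hchanges, List.filter_append, hfilter_low, List.nil_append]
        rw [hL, List.range'_succ, List.filter_cons, show 1 + k = k + 1 by omega, hPk1]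
        simp only [if_true]
        congr 1
        rw [show k + 1 + 1 = k + 2 by omega]
        rw [List.range'_eq_map_range, List.filter_map]
        rw [changesN, hL, show r2.length + 1 - 1 = r2.length by omega,
          List.range'_eq_map_range, List.filter_map, List.map_map]
        rw [List.filter_congr (p := P ∘ (fun x => k + 2 + x))
          (q := (fun i => decide (rest'.getD i 0 ≠ rest'.getD (i - 1) 0)) ∘ (fun x => 1 + x)) (by
          intro j hj
          rw [List.mem_range] at hj
          simp only [Function.comp_apply]
          exact hhighP j hj)]
        congr 1
        funext j
        simp only [Function.comp_apply]
        omega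
      -- assemble
      have hclen : (s :: rest).length = (k + 1) + rest'.length := by
        simp [hrlen]
        omega
      rw [cutsN, hch, hclen]
      have hmap : ((k + 1) :: (changesN rest').map ((k + 1) + ·)) ++ [(k + 1) + rest'.length]
          = (cutsN rest').map ((k + 1) + ·) := by
        rw [cutsN]
        simp
      rw [show (0 : Nat) :: ((k + 1) :: (changesN rest').map ((k + 1) + ·)) ++ [(k+1) + rest'.length]
        = 0 :: (((k + 1) :: (changesN rest').map ((k + 1) + ·)) ++ [(k+1) + rest'.length]) by simp,
        hmap]
      have hcuts' : (cutsN rest').map ((k + 1) + ·) = (k + 1) :: ((changesN rest' ++ [rest'.length]).map ((k+1) + ·)) := by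
        rw [cutsN]; simp
      rw [hcuts', gapsN_cons2, ← hcuts', gapsN_map_add]
      have hih : gapsN (cutsN rest') = pvRunsB rest' := by
        apply ih
        · have : rest'.length ≤ rest.length := by omega
          simp at hy
          omega
        · rw [hr']; simp
      rw [hih, pvRunsB, ← ht_def, ← hrest'_def]
      congr 1
      push_cast
      ring


lemma length_signsOf (x_t : List Int) : (signsOf x_t).length = x_t.length - 1 := by
  simp [signsOf]

lemma signs_getD (x : List Int) (j : Nat) (hj : j < x.length - 1) :
    (signsOf x).getD j 0 =
      if x.getD (j + 1) 0 - x.getD j 0 ≥ 0 then (1 : Int) else -1 := by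
  have hl : j < (signsOf x).length := by rw [length_signsOf]; omega
  rw [List.getD_eq_getElem _ _ hl]
  simp only [signsOf, List.getElem_map, List.getElem_zip, List.getElem_drop]
  rw [List.getD_eq_getElem _ _ (by omega : j + 1 < x.length),
    List.getD_eq_getElem _ _ (by omega : j < x.length)]
  simp [show 1 + j = j + 1 by omega]

lemma gaps_map_cast (L : List Nat) :
    (((L.map (fun c : Nat => (c : Int))).zip ((L.map (fun c : Nat => (c : Int))).drop 1)).map
      (fun p => p.2 - p.1)) = gapsN L := by
  rw [← List.map_drop, List.zip_map, List.map_map]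
  rfl

-- B computes the same run statistics.
lemma B_eq_runs (x_t : List Int) (h2 : 2 ≤ x_t.length) :
    rise_n_fall_criterion_alt x_t =
      (((pvRunsB (signsOf x_t)).length : Int), (pvRunsB (signsOf x_t)).foldl max 1) := by
  simp only [rise_n_fall_criterion_alt]
  rw [if_neg (by omega)]
  set y := signsOf x_t with hy_def
  have hylen : y.length = x_t.length - 1 := length_signsOf x_t
  -- the port's cut list is the cast of cutsN y
  have hm : ((x_t.length : Int) - 1) = ((y.length : Nat) : Int) := by omega
  have hfil : ((PySem.List.pyRange 1 ((x_t.length : Int) - 1) 1).filter (fun i =>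
      (decide (PySem.List.pyGetD x_t (i + 1) 0 ≥ PySem.List.pyGetD x_t i 0)) !=
      (decide (PySem.List.pyGetD x_t i 0 ≥ PySem.List.pyGetD x_t (i - 1) 0)))) =
        (changesN y).map (fun c : Nat => (c : Int)) := by
    rw [PySem.List.pyRange_one]
    rw [show (((x_t.length : Int) - 1) - 1).toNat = x_t.length - 2 by omega]
    rw [List.filter_map]
    rw [changesN, hylen, show x_t.length - 1 - 1 = x_t.length - 2 by omega,
      List.range'_eq_map_range, List.filter_map, List.map_map]
    have hpt : ∀ j ∈ List.range (x_t.length - 2),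
        ((fun i => (decide (PySem.List.pyGetD x_t (i + 1) 0 ≥ PySem.List.pyGetD x_t i 0)) !=
          (decide (PySem.List.pyGetD x_t i 0 ≥ PySem.List.pyGetD x_t (i - 1) 0))) ∘
            (fun k : Nat => (1 : Int) + (k : Int))) j =
        ((fun i => decide (y.getD i 0 ≠ y.getD (i - 1) 0)) ∘ (fun x => 1 + x)) j := by
      intro j hj
      rw [List.mem_range] at hj
      simp only [Function.comp_apply]
      have e2 : (1 : Int) + (j : Nat) + 1 = ((j + 2 : Nat) : Int) := by omega
      have e1 : (1 : Int) + (j : Nat) = ((j + 1 : Nat) : Int) := by omega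
      have e0 : (1 : Int) + (j : Nat) - 1 = ((j : Nat) : Int) := by omega
      rw [e2, e0]
      conv_lhs => rw [e1]
      rw [PySem.List.pyGetD_natCast, PySem.List.pyGetD_natCast, PySem.List.pyGetD_natCast]
      rw [signs_getD x_t (1 + j) (by omega), signs_getD x_t (1 + j - 1) (by omega)]
      rw [show 1 + j - 1 = j by omega, show 1 + j + 1 = j + 2 by omega,
        show 1 + j = j + 1 by omega]
      have hgoal : ∀ a b c : Int,
          ((decide (b ≤ a) != decide (c ≤ b)) : Bool) =
            decide ((if b ≤ a then (1 : Int) else -1) ≠ if c ≤ b then (1 : Int) else -1) := by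
        intro a b c
        by_cases hA : b ≤ a <;> by_cases hB : c ≤ b <;> simp [hA, hB]
      simp only [ge_iff_le, sub_nonneg]
      exact hgoal (x_t.getD (j + 2) 0) (x_t.getD (j + 1) 0) (x_t.getD j 0)
    rw [List.filter_congr hpt]
    exact List.map_congr_left (by
      intro j hj
      simp only [Function.comp_apply]
      omega)
  have hcuts : (0 : Int) :: ((PySem.List.pyRange 1 ((x_t.length : Int) - 1) 1).filter (fun i =>
      (decide (PySem.List.pyGetD x_t (i + 1) 0 ≥ PySem.List.pyGetD x_t i 0)) !=
      (decide (PySem.List.pyGetD x_t i 0 ≥ PySem.List.pyGetD x_t (i - 1) 0)))) ++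
        [(x_t.length : Int) - 1] = (cutsN y).map (fun c : Nat => (c : Int)) := by
    rw [cutsN]
    simp only [List.map_cons, List.map_append, List.map_cons, List.map_nil, Nat.cast_zero]
    rw [hfil, hm]
  rw [hcuts, gaps_map_cast]
  obtain ⟨sg, ys, hsg⟩ : ∃ sg ys, y = sg :: ys := by
    cases hq : y with
    | nil => exfalso; rw [hq] at hylen; simp at hylen; omega
    | cons sg ys => exact ⟨sg, ys, rfl⟩
  have hmain : gapsN (cutsN y) = pvRunsB y :=
    gaps_cuts_eq_runs y.length y (le_refl _) (by rw [hsg]; simp)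
  rw [hmain]
  obtain ⟨r, rs, hrs⟩ : ∃ r rs, pvRunsB y = r :: rs := by
    rw [hsg]
    cases hq : pvRunsB (sg :: ys) with
    | nil => exact absurd hq (pvRunsB_ne_nil _ _)
    | cons r rs => exact ⟨r, rs, rfl⟩
  have hrpos : 1 ≤ r := by
    rw [hsg] at hrs
    exact pvRunsB_head_pos _ _ _ _ hrs
  rw [hrs]
  -- lengths: |cutsN y| - 1 = |runs|
  have hglen : (gapsN (cutsN y)).length = (cutsN y).length - 1 := by
    simp [gapsN]
  have hclen2 : 1 ≤ (cutsN y).length := by simp [cutsN]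
  have hcount : ((List.map (fun c : Nat => (c : Int)) (cutsN y)).length : Int) - 1
      = ((r :: rs).length : Int) := by
    rw [List.length_map]
    have := hglen
    rw [hmain, hrs] at this
    simp at this ⊢
    omega
  rw [hcount]
  simp only [List.foldl_cons, max_eq_right hrpos]


-- ===== VERDICT (by name: the statement is the Claim_ definition above) =====
theorem rise_n_fall_criterion_spec : Claim_equal_rise_n_fall_criterion := by
  intro x_t _
  unfold Spec_rise_n_fall_criterion
  by_cases h2 : 2 ≤ x_t.length
  · rw [A_eq_runs x_t h2, B_eq_runs x_t h2]
  · -- n ≤ 1: both sides are (1, 1)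
    match x_t, h2 with
    | [], _ => decide
    | [a], _ =>
      simp [rise_n_fall_criterion, rise_n_fall_criterion_alt,
        PySem.List.pyRange_one_eq_nil]
    | a :: b :: t, h2 => exact absurd (by simp) h2
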